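-- pv_equiv track=rewrite | github.com/kinjall30/CryptoWebsite | user_identities/temp_OWoCATT.py | maxSumDistinctSum
-- ===== SOURCE A (Python) =====
-- def maxSumDistinctSum(matrix, size):
--     rows = len(matrix)
--     cols = len(matrix[0])
--
--     # Calculate the cumulative sum matrix
--     cumulative_sum = [[0] * (cols + 1) for _ in range(rows + 1)]
--
--     for i in range(1, rows + 1):
--         for j in range(1, cols + 1):
--             cumulative_sum[i][j] = matrix[i - 1][j - 1] + cumulative_sum[i - 1][j] + cumulative_sum[i][j - 1] - cumulative_sum[i - 1][j - 1]
--
--     maxSum = 0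
--     maxSums = set()
--
--     for i in range(size, rows + 1):
--         for j in range(size, cols + 1):
--             submatrix_sum = cumulative_sum[i][j] - cumulative_sum[i - size][j] - cumulative_sum[i][j - size] + cumulative_sum[i - size][j - size]
--             distinct_numbers = set()
--
--             for x in range(i - size, i):
--                 for y in range(j - size, j):
--                     distinct_numbers.add(matrix[x][y])
--
--             if submatrix_sum > maxSum:
--                 maxSum = submatrix_sum
--                 maxSums = distinct_numbers
--             elif submatrix_sum == maxSum:
--                 maxSums.update(distinct_numbers)
--
--     return sum(maxSums)
-- ===== SOURCE B (Python) =====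
-- def maxSumDistinctSum(matrix, size):
--     rows, cols = len(matrix), len(matrix[0])
--     blocks = [[v for row in matrix[i:i+size] for v in row[j:j+size]]
--               for i in range(rows - size + 1)
--               for j in range(cols - size + 1)]
--     best = 0
--     for b in blocks:
--         best = max(best, sum(b))
--     winners = set()
--     for b in blocks:
--         if sum(b) == best:
--             winners.update(b)
--     return sum(winners)
-- ===== Notes on version B (the rewrite author's own statement) =====
-- stated objective: simpler
-- what changed: Replaces the 2D cumulative-sum table and the online (running max, running set) state machine by a plain list of slice-extracted blocks, an offline max pass and a winner-collection pass; the per-cell Python-level loops become C-level slice copies, a constant-factor speed-up.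
import Mathlib
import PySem

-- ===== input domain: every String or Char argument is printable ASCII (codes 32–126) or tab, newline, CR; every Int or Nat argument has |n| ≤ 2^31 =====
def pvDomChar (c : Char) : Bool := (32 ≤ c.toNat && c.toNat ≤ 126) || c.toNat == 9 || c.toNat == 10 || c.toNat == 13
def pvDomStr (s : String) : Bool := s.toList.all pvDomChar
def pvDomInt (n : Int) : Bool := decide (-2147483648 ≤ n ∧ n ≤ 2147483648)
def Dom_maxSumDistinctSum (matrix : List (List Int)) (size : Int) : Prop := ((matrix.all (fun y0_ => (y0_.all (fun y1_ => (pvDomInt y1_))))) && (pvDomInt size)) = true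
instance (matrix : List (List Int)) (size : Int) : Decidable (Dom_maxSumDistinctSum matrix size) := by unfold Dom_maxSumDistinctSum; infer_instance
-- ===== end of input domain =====

-- B replaces A's 2D cumulative-sum table and online (running-max, running-set) state machine by a
-- plain list of slice-extracted blocks, an offline max pass and a winner-collection pass (objective:
-- simpler; same asymptotic cost).

-- ===== PORT A =====
-- matrix[x][y] (indices known nonnegative and in range under Pre_)
def pvGetM (matrix : List (List Int)) (x y : Nat) : Int := (matrix.getD x []).getD y 0
-- cumulative_sum[i][j]
def pvGetC (c : List (List Int)) (i j : Nat) : Int := (c.getD i []).getD j 0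
-- cumulative_sum[i][j] = v  (in-place assignment on the nested list)
def pvSetC (c : List (List Int)) (i j : Nat) (v : Int) : List (List Int) :=
  c.set i ((c.getD i []).set j v)

-- the body of A's first double loop
def pvCumStep (matrix : List (List Int)) (c : List (List Int)) (i j : Nat) : List (List Int) :=
  pvSetC c i j (pvGetM matrix (i - 1) (j - 1) + pvGetC c (i - 1) j + pvGetC c i (j - 1)
                  - pvGetC c (i - 1) (j - 1))

-- cumulative_sum after A's first double loop
def pvBuildCum (matrix : List (List Int)) (rows cols : Nat) : List (List Int) :=
  (List.range' 1 rows).foldl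
    (fun c i => (List.range' 1 cols).foldl (fun c j => pvCumStep matrix c i j) c)
    (List.replicate (rows + 1) (List.replicate (cols + 1) (0 : Int)))

def maxSumDistinctSum (matrix : List (List Int)) (size : Int) : Int :=
  let rows := matrix.length
  let cols := (matrix.headD []).length   -- len(matrix[0]); Pre_ gives matrix ≠ []
  let cum := pvBuildCum matrix rows cols
  let s := size.toNat                    -- Pre_ gives 0 ≤ size, so this is exact
  let res := (List.range' s (rows + 1 - s)).foldl (fun st i =>
      (List.range' s (cols + 1 - s)).foldl (fun st j =>
        let sub := pvGetC cum i j - pvGetC cum (i - s) j - pvGetC cum i (j - s)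
                     + pvGetC cum (i - s) (j - s)
        let distinct := (List.range' (i - s) s).foldl (fun d x =>
            (List.range' (j - s) s).foldl (fun d y => PySem.Set.add d (pvGetM matrix x y)) d)
            (PySem.Set.empty)
        if sub > st.1 then (sub, distinct)
        else if sub = st.1 then (st.1, PySem.Set.update st.2 distinct)
        else st) st)
    ((0 : Int), (PySem.Set.empty : PySem.Set Int))
  res.2.sum

-- ===== PORT B =====
-- [v for row in matrix[i:i+size] for v in row[j:j+size]]
def pvBlock (matrix : List (List Int)) (s : Nat) (i j : Nat) : List Int :=
  (PySem.List.slice matrix (some (i : Int)) (some ((i : Int) + (s : Int)))).flatMap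
    (fun row => PySem.List.slice row (some (j : Int)) (some ((j : Int) + (s : Int))))

def maxSumDistinctSum_alt (matrix : List (List Int)) (size : Int) : Int :=
  let rows := matrix.length
  let cols := (matrix.headD []).length   -- len(matrix[0]); Pre_ gives matrix ≠ []
  let s := size.toNat                    -- Pre_ gives 0 ≤ size, so this is exact
  let blocks := (List.range (rows + 1 - s)).flatMap (fun i =>
      (List.range (cols + 1 - s)).map (fun j => pvBlock matrix s i j))
  let best := blocks.foldl (fun b bl => max b bl.sum) (0 : Int)
  let winners := blocks.foldl
      (fun w bl => if bl.sum = best then PySem.Set.update w bl else w)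
      (PySem.Set.empty : PySem.Set Int)
  winners.sum

-- ===== PRECONDITION & SPEC =====
-- Pre_ excludes exactly the inputs on which A raises: an empty matrix (matrix[0] → IndexError),
-- a row shorter than the first row (matrix[i][j] → IndexError), and a negative size (the loop
-- always reaches cumulative_sum[rows - size] past the end → IndexError).
def Pre_maxSumDistinctSum (matrix : List (List Int)) (size : Int) : Prop :=
  matrix ≠ [] ∧ 0 ≤ size ∧ ∀ row ∈ matrix, (matrix.headD []).length ≤ row.length
instance (matrix : List (List Int)) (size : Int) : Decidable (Pre_maxSumDistinctSum matrix size) := by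
  unfold Pre_maxSumDistinctSum; infer_instance

def pvWitness_maxSumDistinctSum : List (List Int) × Int := ([[1, -2], [3, 4]], 1)

def Spec_maxSumDistinctSum (matrix : List (List Int)) (size : Int) (out : Int) : Prop :=
  out = maxSumDistinctSum_alt matrix size
instance (matrix : List (List Int)) (size : Int) (out : Int) :
    Decidable (Spec_maxSumDistinctSum matrix size out) := by
  unfold Spec_maxSumDistinctSum; infer_instance

-- ===== CLAIM (what is proved, stated in full; the proofs are below) =====
def Claim_equal_maxSumDistinctSum : Prop := ∀ (matrix : List (List Int)) (size : Int), Dom_maxSumDistinctSum matrix size → Pre_maxSumDistinctSum matrix size → Spec_maxSumDistinctSum matrix size (maxSumDistinctSum matrix size)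

-- ===== LEMMAS AND PROOFS =====

-- ---------- generic list lemmas ----------

theorem pvFoldlFlatMap {α β γ : Type} (l : List α) (g : α → List β) (f : γ → β → γ) (a : γ) :
    (l.flatMap g).foldl f a = l.foldl (fun a x => (g x).foldl f a) a := by
  induction l generalizing a with
  | nil => simp
  | cons x t ih => simp [List.flatMap_cons, List.foldl_append, ih]

theorem pvSumFlatMap {α : Type} (l : List α) (g : α → List Int) :
    (l.flatMap g).sum = (l.map (fun x => (g x).sum)).sum := by
  induction l with
  | nil => simp
  | cons x t ih => simp [List.flatMap_cons, ih]

theorem pvDropTakeEqMapRange' {α : Type} (d : α) (l : List α) (a n : Nat)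
    (h : a + n ≤ l.length) : (l.drop a).take n = (List.range' a n).map (fun k => l.getD k d) := by
  apply List.ext_getElem
  · simp; omega
  · intro k h1 h2
    have hk : k < n := by simpa using h2
    have hak : a + k < l.length := by omega
    simp [List.getElem_take, List.getElem_drop, List.getElem_range', List.getD_eq_getElem?_getD,
      List.getElem?_eq_getElem hak]

-- ---------- Set lemmas ----------

theorem pvMemFoldlAdd (L : List Int) (s : PySem.Set Int) (x : Int) :
    x ∈ L.foldl PySem.Set.add s ↔ x ∈ s ∨ x ∈ L := by
  induction L generalizing s with
  | nil => simp
  | cons a t ih => simp [List.foldl_cons, ih, PySem.Set.mem_add]; tauto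

theorem pvAddOfMem {s : PySem.Set Int} {x : Int} (h : x ∈ s) : PySem.Set.add s x = s := by
  simp [PySem.Set.add, h]

theorem pvUpdateDedup (L : List Int) (w : PySem.Set Int) :
    PySem.Set.update w (PySem.Set.ofList L) = PySem.Set.update w L := by
  induction L using List.reverseRecOn generalizing w with
  | nil => rfl
  | append_singleton t x ih =>
    have hof : PySem.Set.ofList (t ++ [x]) = PySem.Set.add (PySem.Set.ofList t) x := by
      simp [PySem.Set.ofList_eq_foldl, List.foldl_append]
    by_cases hx : x ∈ t
    · have h1 : PySem.Set.add (PySem.Set.ofList t) x = PySem.Set.ofList t :=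
        pvAddOfMem ((PySem.Set.mem_ofList t x).2 hx)
      have h2 : x ∈ PySem.Set.update w t := (pvMemFoldlAdd t w x).2 (Or.inr hx)
      calc PySem.Set.update w (PySem.Set.ofList (t ++ [x]))
          = PySem.Set.update w (PySem.Set.ofList t) := by rw [hof, h1]
        _ = PySem.Set.update w t := ih w
        _ = PySem.Set.add (PySem.Set.update w t) x := (pvAddOfMem h2).symm
        _ = PySem.Set.update w (t ++ [x]) := by simp [PySem.Set.update, List.foldl_append]
    · have h4 : x ∉ PySem.Set.ofList t := fun h => hx ((PySem.Set.mem_ofList t x).1 h)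
      have hadd : PySem.Set.add (PySem.Set.ofList t) x = PySem.Set.ofList t ++ [x] := by
        rw [PySem.Set.add, if_neg]
        rw [Bool.not_eq_true, ← Bool.not_eq_true]
        simpa [List.contains_iff_mem] using h4
      calc PySem.Set.update w (PySem.Set.ofList (t ++ [x]))
          = PySem.Set.add (PySem.Set.update w (PySem.Set.ofList t)) x := by
            rw [hof, hadd]; simp [PySem.Set.update, List.foldl_append]
      _ = PySem.Set.add (PySem.Set.update w t) x := by rw [ih w]
      _ = PySem.Set.update w (t ++ [x]) := by simp [PySem.Set.update, List.foldl_append]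

-- ---------- prefix sums ----------

def pvRowSum (matrix : List (List Int)) (x j : Nat) : Int :=
  ((List.range j).map (fun y => pvGetM matrix x y)).sum

def pvF (matrix : List (List Int)) (i j : Nat) : Int :=
  ((List.range i).map (fun x => pvRowSum matrix x j)).sum

theorem pvF_zero_right (matrix : List (List Int)) (i : Nat) : pvF matrix i 0 = 0 := by
  simp [pvF, pvRowSum]

theorem pvF_succ_succ (matrix : List (List Int)) (i j : Nat) :
    pvF matrix (i + 1) (j + 1) =
      pvGetM matrix i j + pvF matrix i (j + 1) + pvF matrix (i + 1) j - pvF matrix i j := by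
  have h1 : ∀ k, pvF matrix (k + 1) (j + 1) = pvF matrix k (j + 1) + pvRowSum matrix k (j + 1) := by
    intro k; simp [pvF, List.sum_range_succ]
  have h2 : ∀ k, pvF matrix (k + 1) j = pvF matrix k j + pvRowSum matrix k j := by
    intro k; simp [pvF, List.sum_range_succ]
  have h3 : pvRowSum matrix i (j + 1) = pvRowSum matrix i j + pvGetM matrix i j := by
    simp [pvRowSum, List.sum_range_succ]
  rw [h1, h2, h3]; ring

theorem pvRangeAddSum (f : Nat → Int) (a b : Nat) :
    ((List.range (a + b)).map f).sum
      = ((List.range a).map f).sum + ((List.range b).map (fun k => f (a + k))).sum := by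
  rw [List.range_add]; simp [List.map_append, List.sum_append, Function.comp_def]

theorem pvSubEqBlockSum (matrix : List (List Int)) (s i0 j0 : Nat) :
    pvF matrix (i0 + s) (j0 + s) - pvF matrix i0 (j0 + s) - pvF matrix (i0 + s) j0
        + pvF matrix i0 j0
      = ((List.range s).map (fun x =>
          ((List.range s).map (fun y => pvGetM matrix (i0 + x) (j0 + y))).sum)).sum := by
  have hrow : ∀ x, pvRowSum matrix x (j0 + s)
      = pvRowSum matrix x j0 + ((List.range s).map (fun y => pvGetM matrix x (j0 + y))).sum := by
    intro x; simp [pvRowSum, pvRangeAddSum]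
  have hF1 : pvF matrix (i0 + s) (j0 + s)
      = pvF matrix i0 (j0 + s) + ((List.range s).map (fun x => pvRowSum matrix (i0 + x) (j0 + s))).sum := by
    simp [pvF, pvRangeAddSum]
  have hF2 : pvF matrix (i0 + s) j0
      = pvF matrix i0 j0 + ((List.range s).map (fun x => pvRowSum matrix (i0 + x) j0)).sum := by
    simp [pvF, pvRangeAddSum]
  have hsplit : ((List.range s).map (fun x => pvRowSum matrix (i0 + x) (j0 + s))).sum
      = ((List.range s).map (fun x => pvRowSum matrix (i0 + x) j0)).sum
        + ((List.range s).map (fun x =>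
            ((List.range s).map (fun y => pvGetM matrix (i0 + x) (j0 + y))).sum)).sum := by
    calc ((List.range s).map (fun x => pvRowSum matrix (i0 + x) (j0 + s))).sum
        = ((List.range s).map (fun x => pvRowSum matrix (i0 + x) j0
            + ((List.range s).map (fun y => pvGetM matrix (i0 + x) (j0 + y))).sum)).sum := by
          apply congrArg; apply List.map_congr_left; intro x _; exact hrow (i0 + x)
      _ = _ := PySem.List.sum_map_add_int _ _ _
  rw [hF1, hF2, hsplit]; ring

-- ---------- the cumulative-sum table ----------

def pvGoodShape (c : List (List Int)) (R C : Nat) : Prop :=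
  c.length = R + 1 ∧ ∀ i, i ≤ R → (c.getD i []).length = C + 1

theorem pvGetCSetC (c : List (List Int)) (i j i' j' : Nat) (v : Int)
    (hi : i < c.length) (hj : j < (c.getD i []).length) :
    pvGetC (pvSetC c i j v) i' j' = if i' = i ∧ j' = j then v else pvGetC c i' j' := by
  unfold pvGetC pvSetC
  simp only [List.getD_eq_getElem?_getD] at hj
  by_cases hii : i' = i
  · subst hii
    have hrow : (c.set i' ((c.getD i' []).set j v)).getD i' [] = (c.getD i' []).set j v := by
      simp [List.getD_eq_getElem?_getD, List.getElem?_set_self hi,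
        List.getElem?_eq_getElem hi]
    rw [hrow]
    by_cases hjj : j' = j
    · subst hjj
      simp [List.getD_eq_getElem?_getD, hj]
    · simp [hjj, List.getD_eq_getElem?_getD, List.getElem?_set_ne (by omega : j ≠ j')]
  · simp [hii, List.getD_eq_getElem?_getD, List.getElem?_set_ne (by omega : i ≠ i')]

theorem pvShapeSetC (c : List (List Int)) (R C i j : Nat) (v : Int)
    (h : pvGoodShape c R C) : pvGoodShape (pvSetC c i j v) R C := by
  obtain ⟨h1, h2⟩ := h
  refine ⟨by simp [pvSetC, h1], ?_⟩
  intro i' hi'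
  by_cases hii : i' = i
  · subst hii
    by_cases hic : i' < c.length
    · simp [pvSetC, List.getD_eq_getElem?_getD, List.getElem?_set_self hic,
        List.getElem?_eq_getElem hic]
      have := h2 i' hi'
      simpa [List.getD_eq_getElem?_getD, List.getElem?_eq_getElem hic] using this
    · simp [pvSetC, List.set_eq_of_length_le (by omega)]
      exact h2 i' hi'
  · have : (pvSetC c i j v).getD i' [] = c.getD i' [] := by
      simp [pvSetC, List.getD_eq_getElem?_getD, List.getElem?_set_ne (by omega : i ≠ i')]
    rw [this]; exact h2 i' hi'

theorem pvInnerCum (matrix : List (List Int)) (R C k : Nat) (c : List (List Int))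
    (hk : k < R) (hs : pvGoodShape c R C)
    (hc : ∀ i ≤ R, ∀ j ≤ C, pvGetC c i j = if i ≤ k then pvF matrix i j else 0) :
    ∀ t ≤ C,
      pvGoodShape ((List.range' 1 t).foldl (fun c j => pvCumStep matrix c (k + 1) j) c) R C ∧
      (∀ i ≤ R, ∀ j ≤ C,
        pvGetC ((List.range' 1 t).foldl (fun c j => pvCumStep matrix c (k + 1) j) c) i j
          = if i ≤ k then pvF matrix i j
            else if i = k + 1 ∧ j ≤ t then pvF matrix (k + 1) j else 0) := by
  intro t
  induction t with
  | zero =>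
    intro _
    refine ⟨hs, ?_⟩
    intro i hi j hj
    simp only [List.range'_zero, List.foldl_nil]
    rw [hc i hi j hj]
    by_cases h1 : i ≤ k
    · simp [h1]
    · rw [if_neg h1, if_neg h1]
      by_cases h2 : i = k + 1 ∧ j ≤ 0
      · rw [if_pos h2]
        have hj0 : j = 0 := by omega
        subst hj0
        rw [pvF_zero_right]
      · rw [if_neg h2]
  | succ t iht =>
    intro ht
    obtain ⟨hs', hc'⟩ := iht (by omega)
    set c' := (List.range' 1 t).foldl (fun c j => pvCumStep matrix c (k + 1) j) c with hc'def
    have hfold : (List.range' 1 (t + 1)).foldl (fun c j => pvCumStep matrix c (k + 1) j) c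
        = pvCumStep matrix c' (k + 1) (t + 1) := by
      rw [List.range'_concat, List.foldl_append]
      simp [hc'def, Nat.add_comm]
    rw [hfold]
    have hval : pvGetM matrix (k + 1 - 1) (t + 1 - 1) + pvGetC c' (k + 1 - 1) (t + 1)
        + pvGetC c' (k + 1) (t + 1 - 1) - pvGetC c' (k + 1 - 1) (t + 1 - 1)
        = pvF matrix (k + 1) (t + 1) := by
      have e1 := hc' k (by omega) (t + 1) ht
      have e2 := hc' (k + 1) (by omega) t (by omega)
      have e3 := hc' k (by omega) t (by omega)
      rw [if_pos (by omega : k ≤ k)] at e1 e3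
      rw [if_neg (by omega : ¬ k + 1 ≤ k),
        if_pos (And.intro rfl (le_refl t) : k + 1 = k + 1 ∧ t ≤ t)] at e2
      simp only [Nat.add_sub_cancel]
      rw [e1, e2, e3, pvF_succ_succ]
    have hib : k + 1 < c'.length := by rw [hs'.1]; omega
    have hjb : t + 1 < (c'.getD (k + 1) []).length := by rw [hs'.2 (k + 1) (by omega)]; omega
    constructor
    · exact pvShapeSetC _ _ _ _ _ _ hs'
    · intro i hi j hj
      unfold pvCumStep
      rw [pvGetCSetC c' (k + 1) (t + 1) i j _ hib hjb]
      by_cases hij : i = k + 1 ∧ j = t + 1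
      · obtain ⟨hi1, hj1⟩ := hij
        subst hi1; subst hj1
        rw [if_pos ⟨rfl, rfl⟩]
        rw [hval]
        rw [if_neg (by omega : ¬ k + 1 ≤ k)]
        rw [if_pos ⟨rfl, le_refl (t + 1)⟩]
      · rw [if_neg hij, hc' i hi j hj]
        by_cases h1 : i ≤ k
        · simp [h1]
        · simp only [if_neg h1]
          by_cases h2 : i = k + 1 ∧ j ≤ t
          · rw [if_pos h2, if_pos (by omega)]
          · rw [if_neg h2, if_neg (by omega)]

theorem pvCumSpec (matrix : List (List Int)) (R C : Nat) :
    ∀ i ≤ R, ∀ j ≤ C, pvGetC (pvBuildCum matrix R C) i j = pvF matrix i j := by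
  suffices h : ∀ k ≤ R,
      pvGoodShape ((List.range' 1 k).foldl
        (fun c i => (List.range' 1 C).foldl (fun c j => pvCumStep matrix c i j) c)
        (List.replicate (R + 1) (List.replicate (C + 1) (0 : Int)))) R C ∧
      (∀ i ≤ R, ∀ j ≤ C,
        pvGetC ((List.range' 1 k).foldl
          (fun c i => (List.range' 1 C).foldl (fun c j => pvCumStep matrix c i j) c)
          (List.replicate (R + 1) (List.replicate (C + 1) (0 : Int)))) i j
          = if i ≤ k then pvF matrix i j else 0) by
    intro i hi j hj
    have := (h R le_rfl).2 i hi j hj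
    rw [pvBuildCum, this, if_pos hi]
  intro k
  induction k with
  | zero =>
    intro _
    constructor
    · refine ⟨by simp, ?_⟩
      intro i hi
      simp [List.getD_eq_getElem?_getD, hi]
    · intro i hi j hj
      simp only [List.range'_zero, List.foldl_nil]
      by_cases h0 : i = 0
      · subst h0
        have hF : pvF matrix 0 j = 0 := by simp [pvF]
        rw [if_pos (le_refl 0), hF]
        simp only [pvGetC, List.getD_eq_getElem?_getD, List.getElem?_replicate]
        split_ifs <;> simp [List.getElem?_replicate] <;> (try split_ifs) <;> (try rfl)
      · rw [if_neg (by omega)]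
        simp only [pvGetC, List.getD_eq_getElem?_getD, List.getElem?_replicate]
        split_ifs <;> simp [List.getElem?_replicate] <;> (try split_ifs) <;> (try rfl)
  | succ k ihk =>
    intro hk
    obtain ⟨hs, hc⟩ := ihk (by omega)
    have hstep := pvInnerCum matrix R C k _ (by omega) hs hc C le_rfl
    have hfold : (List.range' 1 (k + 1)).foldl
        (fun c i => (List.range' 1 C).foldl (fun c j => pvCumStep matrix c i j) c)
        (List.replicate (R + 1) (List.replicate (C + 1) (0 : Int)))
        = (List.range' 1 C).foldl (fun c j => pvCumStep matrix c (k + 1) j)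
            ((List.range' 1 k).foldl
              (fun c i => (List.range' 1 C).foldl (fun c j => pvCumStep matrix c i j) c)
              (List.replicate (R + 1) (List.replicate (C + 1) (0 : Int)))) := by
      rw [List.range'_concat, List.foldl_append]
      simp [Nat.add_comm]
    rw [hfold]
    refine ⟨hstep.1, ?_⟩
    intro i hi j hj
    rw [hstep.2 i hi j hj]
    by_cases h1 : i ≤ k
    · rw [if_pos h1, if_pos (by omega)]
    · by_cases h2 : i = k + 1
      · rw [if_neg h1, if_pos ⟨h2, hj⟩, if_pos (by omega), h2]
      · rw [if_neg h1, if_neg (by simp [h2]), if_neg (by omega)]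

-- ---------- the online (max, winners) fold ----------

def pvStepA (st : Int × PySem.Set Int) (p : Int × List Int) : Int × PySem.Set Int :=
  if p.1 > st.1 then (p.1, PySem.Set.update PySem.Set.empty p.2)
  else if p.1 = st.1 then (st.1, PySem.Set.update st.2 (PySem.Set.update PySem.Set.empty p.2))
  else st

def pvFMax (ps : List (Int × List Int)) (m : Int) : Int := ps.foldl (fun a p => max a p.1) m

def pvFWin (v : Int) (ps : List (Int × List Int)) (w : PySem.Set Int) : PySem.Set Int :=
  ps.foldl (fun w p => if p.1 = v then PySem.Set.update w p.2 else w) w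

theorem pvLeFMax (ps : List (Int × List Int)) (m : Int) : m ≤ pvFMax ps m := by
  induction ps generalizing m with
  | nil => simp [pvFMax]
  | cons p t ih =>
    simp only [pvFMax, List.foldl_cons]
    exact le_trans (le_max_left m p.1) (ih (max m p.1))

theorem pvOnline (ps : List (Int × List Int)) : ∀ (m : Int) (w : PySem.Set Int),
    ps.foldl pvStepA (m, w)
      = (pvFMax ps m,
         pvFWin (pvFMax ps m) ps (if m = pvFMax ps m then w else PySem.Set.empty)) := by
  induction ps with
  | nil => intro m w; simp [pvFMax, pvFWin]
  | cons p t ih =>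
    intro m w
    obtain ⟨s, L⟩ := p
    have hfm : pvFMax ((s, L) :: t) m = pvFMax t (max m s) := rfl
    have hfw : ∀ (v : Int) (w0 : PySem.Set Int), pvFWin v ((s, L) :: t) w0
        = pvFWin v t (if s = v then PySem.Set.update w0 L else w0) := fun _ _ => rfl
    rcases lt_trichotomy m s with h | h | h
    · have hstep : List.foldl pvStepA (m, w) ((s, L) :: t)
          = List.foldl pvStepA (s, PySem.Set.update PySem.Set.empty L) t := by
        simp only [List.foldl_cons]
        congr 1
        unfold pvStepA
        rw [if_pos h]
      have hmax : max m s = s := max_eq_right h.le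
      have hne : m ≠ pvFMax t s := by have := pvLeFMax t s; omega
      rw [hstep, ih s (PySem.Set.update PySem.Set.empty L), hfm, hmax, hfw, if_neg hne]
    · subst h
      have hdd : PySem.Set.update w (PySem.Set.update PySem.Set.empty L)
          = PySem.Set.update w L := by
        rw [show PySem.Set.update PySem.Set.empty L = PySem.Set.ofList L from
          (PySem.Set.ofList_eq_foldl L).symm]
        exact pvUpdateDedup L w
      have hstep : List.foldl pvStepA (m, w) ((m, L) :: t)
          = List.foldl pvStepA (m, PySem.Set.update w L) t := by
        simp only [List.foldl_cons]
        congr 1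
        unfold pvStepA
        rw [if_neg (by omega : ¬ (m > m)), if_pos rfl, hdd]
      have hmax : max m m = m := max_self m
      rw [hstep, ih m (PySem.Set.update w L), hfm, hmax, hfw]
      by_cases h2 : m = pvFMax t m
      · rw [if_pos h2, if_pos h2.symm.symm, if_pos h2]
      · rw [if_neg h2, if_neg (fun hh => h2 hh), if_neg h2]
    · have hstep : List.foldl pvStepA (m, w) ((s, L) :: t)
          = List.foldl pvStepA (m, w) t := by
        simp only [List.foldl_cons]
        congr 1
        unfold pvStepA
        rw [if_neg (by omega : ¬ (s > m)), if_neg (by omega : ¬ (s = m))]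
      have hmax : max m s = m := max_eq_left h.le
      have hne : s ≠ pvFMax t m := by have := pvLeFMax t m; omega
      rw [hstep, ih m w, hfm, hmax, hfw, if_neg hne]

-- ---------- reshaping lemmas ----------

theorem pvNestedFoldl {γ : Type} (li lj : List Nat) (g : γ → Nat → Nat → γ) (a : γ) :
    li.foldl (fun st i => lj.foldl (fun st j => g st i j) st) a
      = (li.flatMap (fun i => lj.map (fun j => (i, j)))).foldl (fun st p => g st p.1 p.2) a := by
  rw [pvFoldlFlatMap]
  simp only [List.foldl_map]

theorem pvIJshift (s nI nJ : Nat) :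
    (List.range' s nI).flatMap (fun i => (List.range' s nJ).map (fun j => (i, j)))
      = ((List.range nI).flatMap (fun i0 => (List.range nJ).map (fun j0 => (i0, j0)))).map
          (fun p => (s + p.1, s + p.2)) := by
  rw [List.map_flatMap]
  simp only [List.range'_eq_map_range, List.flatMap_map, List.map_map, Function.comp_def]

theorem pvIJmap {β : Type} (nI nJ : Nat) (f : Nat → Nat → β) :
    ((List.range nI).flatMap (fun i0 => (List.range nJ).map (fun j0 => (i0, j0)))).map
        (fun p => f p.1 p.2)
      = (List.range nI).flatMap (fun i => (List.range nJ).map (fun j => f i j)) := by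
  rw [List.map_flatMap]
  simp only [List.map_map, Function.comp_def]

theorem pvMemIJ (nI nJ i0 j0 : Nat)
    (h : (i0, j0) ∈ (List.range nI).flatMap (fun i0 => (List.range nJ).map (fun j0 => (i0, j0)))) :
    i0 < nI ∧ j0 < nJ := by
  simp only [List.mem_flatMap, List.mem_map, List.mem_range] at h
  obtain ⟨a, ha, b, hb, he⟩ := h
  cases he
  exact ⟨ha, hb⟩

theorem pvBlockEq (matrix : List (List Int)) (s i0 j0 C : Nat)
    (hC : ∀ row ∈ matrix, C ≤ row.length)
    (hi : i0 + s ≤ matrix.length) (hj : j0 + s ≤ C) :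
    pvBlock matrix s i0 j0
      = (List.range' i0 s).flatMap (fun x =>
          (List.range' j0 s).map (fun y => pvGetM matrix x y)) := by
  unfold pvBlock
  rw [PySem.List.slice_natCast_add, pvDropTakeEqMapRange' [] matrix i0 s hi, List.flatMap_map]
  apply List.flatMap_congr
  intro x hx
  have hxb : i0 ≤ x ∧ x < i0 + s := by simpa [List.mem_range'_1] using hx
  have hxl : x < matrix.length := by omega
  have hrow : matrix.getD x [] ∈ matrix := by
    rw [List.getD_eq_getElem?_getD, List.getElem?_eq_getElem hxl]
    exact List.getElem_mem hxl
  have hlen : j0 + s ≤ (matrix.getD x []).length := le_trans hj (hC _ hrow)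
  rw [PySem.List.slice_natCast_add, pvDropTakeEqMapRange' 0 (matrix.getD x []) j0 s hlen]
  rfl

theorem pvLSum (matrix : List (List Int)) (s i0 j0 : Nat) :
    ((List.range' i0 s).flatMap (fun x =>
        (List.range' j0 s).map (fun y => pvGetM matrix x y))).sum
      = pvF matrix (i0 + s) (j0 + s) - pvF matrix i0 (j0 + s) - pvF matrix (i0 + s) j0
          + pvF matrix i0 j0 := by
  rw [pvSubEqBlockSum, pvSumFlatMap]
  simp only [List.range'_eq_map_range, List.map_map, Function.comp_def]

theorem pvAFold (matrix cum : List (List Int)) (s nI nJ : Nat) :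
    (List.range' s nI).foldl (fun st i =>
        (List.range' s nJ).foldl (fun st j =>
          let sub := pvGetC cum i j - pvGetC cum (i - s) j - pvGetC cum i (j - s)
                       + pvGetC cum (i - s) (j - s)
          let distinct := (List.range' (i - s) s).foldl (fun d x =>
              (List.range' (j - s) s).foldl (fun d y => PySem.Set.add d (pvGetM matrix x y)) d)
              PySem.Set.empty
          if sub > st.1 then (sub, distinct)
          else if sub = st.1 then (st.1, PySem.Set.update st.2 distinct)
          else st) st)
      ((0 : Int), (PySem.Set.empty : PySem.Set Int))
    = List.foldl pvStepA (0, PySem.Set.empty)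
        (((List.range nI).flatMap (fun i0 => (List.range nJ).map (fun j0 => (i0, j0)))).map
          (fun p => (pvGetC cum (s + p.1) (s + p.2) - pvGetC cum p.1 (s + p.2)
                       - pvGetC cum (s + p.1) p.2 + pvGetC cum p.1 p.2,
                     (List.range' p.1 s).flatMap (fun x =>
                       (List.range' p.2 s).map (fun y => pvGetM matrix x y))))) := by
  rw [pvNestedFoldl, pvIJshift s nI nJ, List.foldl_map, List.foldl_map]
  congr 1
  funext st p
  simp only [Nat.add_sub_cancel_left]
  unfold pvStepA
  simp only [PySem.Set.update, pvFoldlFlatMap, List.foldl_map]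

theorem pvBFold (matrix : List (List Int)) (s nI nJ : Nat) :
    List.foldl (fun w bl =>
        if bl.sum = List.foldl (fun b bl => max b bl.sum) (0 : Int)
            ((List.range nI).flatMap (fun i => (List.range nJ).map (fun j => pvBlock matrix s i j)))
          then PySem.Set.update w bl else w)
      (PySem.Set.empty : PySem.Set Int)
      ((List.range nI).flatMap (fun i => (List.range nJ).map (fun j => pvBlock matrix s i j)))
    = pvFWin
        (pvFMax (((List.range nI).flatMap (fun i0 => (List.range nJ).map (fun j0 => (i0, j0)))).map
          (fun p => ((pvBlock matrix s p.1 p.2).sum, pvBlock matrix s p.1 p.2)) ) 0)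
        (((List.range nI).flatMap (fun i0 => (List.range nJ).map (fun j0 => (i0, j0)))).map
          (fun p => ((pvBlock matrix s p.1 p.2).sum, pvBlock matrix s p.1 p.2)))
        PySem.Set.empty := by
  have hb : (List.range nI).flatMap (fun i => (List.range nJ).map (fun j => pvBlock matrix s i j))
      = (((List.range nI).flatMap (fun i0 => (List.range nJ).map (fun j0 => (i0, j0)))).map
          (fun p => pvBlock matrix s p.1 p.2)) :=
    (pvIJmap nI nJ (fun i j => pvBlock matrix s i j)).symm
  rw [hb]
  unfold pvFWin pvFMax
  simp only [List.foldl_map]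

theorem pvPsEq (matrix : List (List Int)) (s : Nat)
    (hrows : ∀ row ∈ matrix, (matrix.headD []).length ≤ row.length) :
    (((List.range (matrix.length + 1 - s)).flatMap
        (fun i0 => (List.range ((matrix.headD []).length + 1 - s)).map (fun j0 => (i0, j0)))).map
      (fun p => (pvGetC (pvBuildCum matrix matrix.length (matrix.headD []).length) (s + p.1) (s + p.2)
                   - pvGetC (pvBuildCum matrix matrix.length (matrix.headD []).length) p.1 (s + p.2)
                   - pvGetC (pvBuildCum matrix matrix.length (matrix.headD []).length) (s + p.1) p.2
                   + pvGetC (pvBuildCum matrix matrix.length (matrix.headD []).length) p.1 p.2,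
                 (List.range' p.1 s).flatMap (fun x =>
                   (List.range' p.2 s).map (fun y => pvGetM matrix x y)))))
    = (((List.range (matrix.length + 1 - s)).flatMap
        (fun i0 => (List.range ((matrix.headD []).length + 1 - s)).map (fun j0 => (i0, j0)))).map
      (fun p => ((pvBlock matrix s p.1 p.2).sum, pvBlock matrix s p.1 p.2))) := by
  apply List.map_congr_left
  intro p hp
  obtain ⟨i0, j0⟩ := p
  obtain ⟨h1, h2⟩ := pvMemIJ _ _ i0 j0 hp
  have hi : i0 + s ≤ matrix.length := by omega
  have hj : j0 + s ≤ (matrix.headD []).length := by omega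
  have hcum := pvCumSpec matrix matrix.length (matrix.headD []).length
  have hblk := pvBlockEq matrix s i0 j0 (matrix.headD []).length hrows hi hj
  refine congrArg₂ Prod.mk ?_ ?_
  · rw [hblk, pvLSum]
    rw [hcum (s + i0) (by omega) (s + j0) (by omega), hcum i0 (by omega) (s + j0) (by omega),
      hcum (s + i0) (by omega) j0 (by omega), hcum i0 (by omega) j0 (by omega)]
    rw [Nat.add_comm s i0, Nat.add_comm s j0]
  · exact hblk.symm

theorem pvMain (matrix : List (List Int)) (size : Int)
    (hrows : ∀ row ∈ matrix, (matrix.headD []).length ≤ row.length) :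
    maxSumDistinctSum matrix size = maxSumDistinctSum_alt matrix size := by
  refine Eq.trans (congrArg (fun st : Int × PySem.Set Int => st.2.sum)
      (pvAFold matrix (pvBuildCum matrix matrix.length (matrix.headD []).length) size.toNat
        (matrix.length + 1 - size.toNat) ((matrix.headD []).length + 1 - size.toNat))) ?_
  refine Eq.trans ?_ (congrArg List.sum (pvBFold matrix size.toNat
      (matrix.length + 1 - size.toNat) ((matrix.headD []).length + 1 - size.toNat))).symm
  rw [pvOnline]
  rw [pvPsEq matrix size.toNat hrows]
  simp only [ite_self]

-- ===== VERDICT (by name: the statement is the Claim_ definition above) =====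
theorem maxSumDistinctSum_spec : Claim_equal_maxSumDistinctSum := by
  intro matrix size _hdom hpre
  exact pvMain matrix size hpre.2.2
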